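-- pv_equiv track=rewrite | github.com/yoon-arc/BOJ | 백준/Silver/20546. 🐜 기적의 매매법 🐜/🐜 기적의 매매법 🐜.py | sung
-- ===== SOURCE A (Python) =====
-- def sung(m, r):
--     total = 0
--     up = down = 0
--     for i in range(1, len(r)):
--         if r[i] > r[i-1]:
--             up += 1
--             down = 0
--         elif r[i-1] > r[i]:
--             down += 1
--             up = 0
--         else:
--             up = down = 0
--
--         if down >= 3:
--             amount = m // r[i]
--             total += amount
--             m -= r[i]*amount
--         if total and up >= 3:
--             m = total * r[i]
--             total = 0
--         else:
--             continue
--     return (total*r[-1])+m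
-- ===== SOURCE B (Python) =====
-- def sung(m, r):
--     # Segment the price sequence into maximal strictly-monotone runs (equal
--     # prices break runs), turn each run into trade events (a down-run of k
--     # steps yields buys at its 3rd..k-th prices; an up-run of >=3 steps yields
--     # one sell at its 3rd price), then replay the event list once.
--     events = []
--     n = len(r)
--     i = 1
--     while i < n:
--         if r[i] > r[i - 1]:
--             j = i
--             while j < n and r[j] > r[j - 1]:
--                 j += 1
--             if j - i >= 3:
--                 events.append(('S', r[i + 2]))
--             i = j
--         elif r[i] < r[i - 1]:
--             j = i
--             while j < n and r[j] < r[j - 1]: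
--                 j += 1
--             for k in range(i + 2, j):
--                 events.append(('B', r[k]))
--             i = j
--         else:
--             i += 1
--     total = 0
--     for kind, p in events:
--         if kind == 'B':
--             amount = m // p
--             total += amount
--             m -= p * amount
--         elif total:
--             m = total * p
--             total = 0
--     return total * r[-1] + m
-- ===== Notes on version B (the rewrite author's own statement) =====
-- stated objective: alternative
-- what changed: B replaces A's day-by-day up/down-counter simulation by run segmentation: it cuts the price sequence into maximal strictly-monotone runs, compiles each run into buy/sell events (a down-run of k steps yields buys at its 3rd..k-th prices; an up-run of >=3 steps yields a single sell at its 3rd price), then replays the event list once over the wallet state.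
import Mathlib
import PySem

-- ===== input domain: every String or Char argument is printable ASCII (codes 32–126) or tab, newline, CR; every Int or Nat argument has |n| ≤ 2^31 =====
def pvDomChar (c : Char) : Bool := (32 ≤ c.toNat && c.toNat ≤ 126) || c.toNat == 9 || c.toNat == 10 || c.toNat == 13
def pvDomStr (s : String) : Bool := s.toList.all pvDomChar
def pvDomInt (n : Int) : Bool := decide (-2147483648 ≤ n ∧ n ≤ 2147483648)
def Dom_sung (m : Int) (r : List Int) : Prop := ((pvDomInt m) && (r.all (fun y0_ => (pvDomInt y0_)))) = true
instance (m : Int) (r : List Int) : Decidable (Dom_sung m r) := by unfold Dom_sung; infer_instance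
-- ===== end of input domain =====

-- B replaces A's day-by-day counter simulation by run segmentation: it cuts the price
-- sequence into maximal monotone runs, compiles them into a buy/sell event list, and
-- replays that list once; equal return value on Pre_ (A raises outside it).

-- ===== PORT A =====
-- A's single loop: state (total, up, down, m), comparing r[i] with r[i-1] (prev carries r[i-1]).
def sungLoopA (prev : Int) (rest : List Int) (total up down m : Int) : Int × Int :=
  match rest with
  | [] => (total, m)
  | x :: xs =>
    let up' : Int := if x > prev then up + 1 else 0
    let down' : Int := if x > prev then 0 else if prev > x then down + 1 else 0
    let amount : Int := PySem.Int.floordiv m x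
    let total1 : Int := if down' ≥ 3 then total + amount else total
    let m1 : Int := if down' ≥ 3 then m - x * amount else m
    let total2 : Int := if total1 ≠ 0 ∧ up' ≥ 3 then 0 else total1
    let m2 : Int := if total1 ≠ 0 ∧ up' ≥ 3 then total1 * x else m1
    sungLoopA x xs total2 up' down' m2

def sung (m : Int) (r : List Int) : Int :=
  let res := match r with
    | [] => ((0 : Int), m)
    | p :: rest => sungLoopA p rest 0 0 0 m
  res.1 * PySem.List.pyGetD r (-1) 0 + res.2

-- ===== PORT B =====
-- B's inner 'while r[j] > r[j-1]' scan: returns (run steps, remainder).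
def scanUp (prev : Int) (xs : List Int) : List Int × List Int :=
  match xs with
  | [] => ([], [])
  | x :: rest =>
    if x > prev then ((scanUp x rest).1.cons x, (scanUp x rest).2) else ([], x :: rest)

-- B's inner 'while r[j] < r[j-1]' scan.
def scanDown (prev : Int) (xs : List Int) : List Int × List Int :=
  match xs with
  | [] => ([], [])
  | x :: rest =>
    if x < prev then ((scanDown x rest).1.cons x, (scanDown x rest).2) else ([], x :: rest)

theorem scanUp_len (prev : Int) (xs : List Int) : (scanUp prev xs).2.length ≤ xs.length := by
  induction xs generalizing prev with
  | nil => simp [scanUp]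
  | cons x rest ih =>
    simp only [scanUp]
    split
    · exact le_trans (ih x) (Nat.le_succ _)
    · simp

theorem scanDown_len (prev : Int) (xs : List Int) : (scanDown prev xs).2.length ≤ xs.length := by
  induction xs generalizing prev with
  | nil => simp [scanDown]
  | cons x rest ih =>
    simp only [scanDown]
    split
    · exact le_trans (ih x) (Nat.le_succ _)
    · simp

-- B pass 1: compile the runs into the event list (true = buy, false = sell).
def eventsB (prev : Int) (xs : List Int) : List (Bool × Int) :=
  match xs with
  | [] => []
  | x :: rest =>
    if x > prev then
      let run := x :: (scanUp x rest).1
      let rem := (scanUp x rest).2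
      (if 3 ≤ run.length then [(false, run.getD 2 0)] else []) ++
        eventsB (run.getLastD prev) rem
    else if x < prev then
      let run := x :: (scanDown x rest).1
      let rem := (scanDown x rest).2
      (run.drop 2).map (fun p => (true, p)) ++ eventsB (run.getLastD prev) rem
    else
      eventsB x rest
termination_by xs.length
decreasing_by
  · exact Nat.lt_succ_of_le (scanUp_len x rest)
  · exact Nat.lt_succ_of_le (scanDown_len x rest)
  · simp

-- B pass 2: replay the event list over the wallet state.
def tradeEvents (evs : List (Bool × Int)) (m total : Int) : Int × Int :=
  match evs with
  | [] => (total, m)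
  | (isBuy, p) :: rest =>
    if isBuy then
      let amount := PySem.Int.floordiv m p
      tradeEvents rest (m - p * amount) (total + amount)
    else if total ≠ 0 then tradeEvents rest (total * p) 0
    else tradeEvents rest m total

def sung_alt (m : Int) (r : List Int) : Int :=
  let res := match r with
    | [] => ((0 : Int), m)
    | p :: rest => tradeEvents (eventsB p rest) m 0
  res.1 * PySem.List.pyGetD r (-1) 0 + res.2

-- ===== PRECONDITION & SPEC =====
-- Pre_ excludes exactly the inputs where Python A raises: r = [] (IndexError on r[-1]) and
-- lists with a strictly-decreasing run of length ≥ 3 ending at a zero price (ZeroDivisionError in m // r[i]).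
def Pre_sung (_m : Int) (r : List Int) : Prop :=
  r ≠ [] ∧ ∀ i < r.length, i + 3 < r.length →
    ¬(r.getD i 0 > r.getD (i+1) 0 ∧ r.getD (i+1) 0 > r.getD (i+2) 0 ∧
      r.getD (i+2) 0 > r.getD (i+3) 0 ∧ r.getD (i+3) 0 = 0)
instance (m : Int) (r : List Int) : Decidable (Pre_sung m r) := by unfold Pre_sung; infer_instance

def pvWitness_sung : Int × List Int := (10, [5, 4, 3, 2, 6, 7, 8, 9])

def Spec_sung (m : Int) (r : List Int) (out : Int) : Prop := out = sung_alt m r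
instance (m : Int) (r : List Int) (out : Int) : Decidable (Spec_sung m r out) := by unfold Spec_sung; infer_instance

-- ===== CLAIM (what is proved, stated in full; the proofs are below) =====
def Claim_equal_sung : Prop := ∀ (m : Int) (r : List Int), Dom_sung m r → Pre_sung m r → Spec_sung m r (sung m r)

-- ===== LEMMAS AND PROOFS =====

theorem lastD_cons (x d : Int) (l : List Int) : (x :: l).getLastD d = l.getLastD x := by
  cases l <;> simp [List.getLastD]

-- The remainder of a scan starts with a step that does not continue the run.
theorem scanUp_maximal (prev : Int) (xs : List Int) :
    ∀ y, (scanUp prev xs).2.head? = some y → ¬ ((scanUp prev xs).1.getLastD prev < y) := by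
  induction xs generalizing prev with
  | nil => intro y hy; simp [scanUp] at hy
  | cons x rest ih =>
    intro y hy
    simp only [scanUp] at hy ⊢
    by_cases h : x > prev
    · simp only [if_pos h] at hy ⊢
      rw [lastD_cons]
      exact ih x y hy
    · simp only [if_neg h] at hy ⊢
      simp only [List.head?_cons, Option.some.injEq] at hy
      subst hy
      simpa [List.getLastD] using h

theorem scanDown_maximal (prev : Int) (xs : List Int) :
    ∀ y, (scanDown prev xs).2.head? = some y → ¬ (y < (scanDown prev xs).1.getLastD prev) := by
  induction xs generalizing prev with
  | nil => intro y hy; simp [scanDown] at hy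
  | cons x rest ih =>
    intro y hy
    simp only [scanDown] at hy ⊢
    by_cases h : x < prev
    · simp only [if_pos h] at hy ⊢
      rw [lastD_cons]
      exact ih x y hy
    · simp only [if_neg h] at hy ⊢
      simp only [List.head?_cons, Option.some.injEq] at hy
      subst hy
      simpa [List.getLastD] using h

-- A's loop over an up-run with no holdings: counters advance, wallet untouched.
theorem upA_zero (xs : List Int) (prev u m : Int) :
    sungLoopA prev xs 0 u 0 m =
      sungLoopA ((scanUp prev xs).1.getLastD prev) (scanUp prev xs).2 0
        (u + ((scanUp prev xs).1.length : Int)) 0 m := by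
  induction xs generalizing prev u with
  | nil => simp [scanUp]
  | cons x rest ih =>
    simp only [scanUp]
    by_cases h : x > prev
    · simp only [if_pos h]
      have step : sungLoopA prev (x :: rest) 0 u 0 m = sungLoopA x rest 0 (u+1) 0 m := by
        simp only [sungLoopA, if_pos h]
        norm_num
      have harg : u + 1 + ((scanUp x rest).1.length : Int) =
          u + (((x :: (scanUp x rest).1).length : Nat) : Int) := by
        push_cast [List.length_cons]; ring
      rw [step, ih x (u+1), lastD_cons, harg]
    · simp only [if_neg h]
      simp

-- A's loop over an up-run with holdings: sells once when the counter reaches 3.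
theorem upA_pos (xs : List Int) (prev total u m : Int) (ht : total ≠ 0)
    (h0 : 0 ≤ u) (h2 : u ≤ 2) :
    sungLoopA prev xs total u 0 m =
      if 3 ≤ u + ((scanUp prev xs).1.length : Int) then
        sungLoopA ((scanUp prev xs).1.getLastD prev) (scanUp prev xs).2 0
          (u + ((scanUp prev xs).1.length : Int)) 0
          (total * (scanUp prev xs).1.getD (2 - u).toNat 0)
      else
        sungLoopA ((scanUp prev xs).1.getLastD prev) (scanUp prev xs).2 total
          (u + ((scanUp prev xs).1.length : Int)) 0 m := by
  induction xs generalizing prev u with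
  | nil =>
    simp only [scanUp, List.length_nil, Nat.cast_zero, add_zero]
    rw [if_neg (by omega)]
    simp [List.getLastD]
  | cons x rest ih =>
    simp only [scanUp]
    by_cases h : x > prev
    · simp only [if_pos h]
      by_cases hu : u = 2
      · -- counter reaches 3: sell fires
        have step : sungLoopA prev (x :: rest) total u 0 m =
            sungLoopA x rest 0 3 0 (total * x) := by
          simp only [sungLoopA, if_pos h]
          have h3 : ¬ ((0:Int) ≥ 3) := by omega
          simp only [if_neg h3]
          have hc : total ≠ 0 ∧ u + 1 ≥ 3 := ⟨ht, by omega⟩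
          simp only [if_pos hc]
          subst hu; rfl
        rw [step, upA_zero rest x 3 (total * x),
          if_pos (show 3 ≤ u + (((x :: (scanUp x rest).1).length : Nat) : Int) by
            push_cast [List.length_cons]; omega),
          lastD_cons]
        have harg : (3:Int) + ((scanUp x rest).1.length : Int) =
            u + (((x :: (scanUp x rest).1).length : Nat) : Int) := by
          push_cast [List.length_cons]; omega
        rw [harg]
        have hidx : ((2:Int) - u).toNat = 0 := by omega
        simp [hidx]
      · -- counter below 3: just count
        have step : sungLoopA prev (x :: rest) total u 0 m =
            sungLoopA x rest total (u+1) 0 m := by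
          simp only [sungLoopA, if_pos h]
          have h3 : ¬ ((0:Int) ≥ 3) := by omega
          have hc : ¬ (total ≠ 0 ∧ u + 1 ≥ 3) := by rintro ⟨-, hh⟩; omega
          simp only [if_neg h3, if_neg hc]
        rw [step, ih x (u+1) (by omega) (by omega), lastD_cons]
        have harg : u + 1 + ((scanUp x rest).1.length : Int) =
            u + (((x :: (scanUp x rest).1).length : Nat) : Int) := by
          push_cast [List.length_cons]; ring
        have hidx : ((2:Int) - u).toNat = ((2:Int) - (u+1)).toNat + 1 := by omega
        by_cases hge : 3 ≤ u + 1 + ((scanUp x rest).1.length : Int)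
        · rw [if_pos hge, if_pos (by rw [← harg]; exact hge), harg, hidx]
          simp
        · rw [if_neg hge, if_neg (by rw [← harg]; exact hge), harg]
    · simp only [if_neg h, List.length_nil, Nat.cast_zero, add_zero]
      rw [if_neg (by omega)]
      simp [List.getLastD]

-- B's buys replayed over a price list (returns (total, m)).
def buyFold (ps : List Int) (m total : Int) : Int × Int :=
  match ps with
  | [] => (total, m)
  | p :: rest =>
    buyFold rest (m - p * PySem.Int.floordiv m p) (total + PySem.Int.floordiv m p)

-- A's loop over a down-run: buys from the step where the counter reaches 3.
theorem downA (xs : List Int) (prev total d m : Int) (hd : 0 ≤ d) :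
    sungLoopA prev xs total 0 d m =
      sungLoopA ((scanDown prev xs).1.getLastD prev) (scanDown prev xs).2
        (buyFold ((scanDown prev xs).1.drop (2 - d).toNat) m total).1 0
        (d + ((scanDown prev xs).1.length : Int))
        (buyFold ((scanDown prev xs).1.drop (2 - d).toNat) m total).2 := by
  induction xs generalizing prev total d m with
  | nil => simp [scanDown, buyFold]
  | cons x rest ih =>
    simp only [scanDown]
    by_cases h : x < prev
    · simp only [if_pos h]
      have hnx : ¬ (x > prev) := by omega
      have harg : d + 1 + ((scanDown x rest).1.length : Int) =
          d + (((x :: (scanDown x rest).1).length : Nat) : Int) := by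
        push_cast [List.length_cons]; ring
      by_cases hb : 2 ≤ d
      · -- buy fires at this step
        have step : sungLoopA prev (x :: rest) total 0 d m =
            sungLoopA x rest (total + PySem.Int.floordiv m x) 0 (d+1)
              (m - x * PySem.Int.floordiv m x) := by
          simp only [sungLoopA, if_neg hnx, if_pos h]
          have hge : (d + 1 : Int) ≥ 3 := by omega
          have hns : ¬ (total + PySem.Int.floordiv m x ≠ 0 ∧ (0:Int) ≥ 3) := by
            rintro ⟨-, hh⟩; omega
          simp only [if_pos hge, if_neg hns]
        rw [step, ih x _ (d+1) _ (by omega), lastD_cons, harg]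
        have e1 : ((2:Int) - d).toNat = 0 := by omega
        have e2 : ((2:Int) - (d+1)).toNat = 0 := by omega
        simp [e1, e2, buyFold]
      · -- counter still below 3: no buy
        have step : sungLoopA prev (x :: rest) total 0 d m =
            sungLoopA x rest total 0 (d+1) m := by
          simp only [sungLoopA, if_neg hnx, if_pos h]
          have hge : ¬ ((d + 1 : Int) ≥ 3) := by omega
          have hns : ¬ (total ≠ 0 ∧ (0:Int) ≥ 3) := by rintro ⟨-, hh⟩; omega
          simp only [if_neg hge, if_neg hns]
        rw [step, ih x _ (d+1) _ (by omega), lastD_cons, harg]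
        have hidx : ((2:Int) - d).toNat = ((2:Int) - (d+1)).toNat + 1 := by omega
        simp [hidx]
    · simp only [if_neg h]
      simp [buyFold, List.getLastD]

theorem trade_buys (ps : List Int) (evs : List (Bool × Int)) (m total : Int) :
    tradeEvents (ps.map (fun p => (true, p)) ++ evs) m total =
      tradeEvents evs (buyFold ps m total).2 (buyFold ps m total).1 := by
  induction ps generalizing m total with
  | nil => simp [buyFold]
  | cons p rest ih => simp [tradeEvents, buyFold, ih]

-- A's fused loop equals B's replay of B's compiled event list, from any boundary state.
theorem mainLoop : ∀ (n : Nat) (xs : List Int), xs.length ≤ n →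
    ∀ (prev total up down m : Int), 0 ≤ up → 0 ≤ down →
    (∀ y, xs.head? = some y → prev < y → up = 0) →
    (∀ y, xs.head? = some y → y < prev → down = 0) →
    sungLoopA prev xs total up down m = tradeEvents (eventsB prev xs) m total := by
  intro n
  induction n with
  | zero =>
    intro xs hlen prev total up down m _ _ _ _
    have : xs = [] := List.eq_nil_of_length_eq_zero (Nat.le_zero.mp hlen)
    subst this; simp [sungLoopA, eventsB, tradeEvents]
  | succ n ih =>
    intro xs hlen prev total up down m hup hdown hu hd
    match xs with
    | [] => simp [sungLoopA, eventsB, tradeEvents]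
    | x :: rest =>
      have hlenr : rest.length ≤ n := by simpa using Nat.le_of_succ_le_succ hlen
      by_cases hgt : x > prev
      · -- up-run
        have hup0 : up = 0 := hu x rfl hgt
        subst hup0
        -- down' = 0 on this step, so the incoming down value is irrelevant
        have reset : sungLoopA prev (x :: rest) total 0 down m =
            sungLoopA prev (x :: rest) total 0 0 m := by
          simp only [sungLoopA, if_pos hgt]
        rw [reset]
        have hremlen : (scanUp prev (x :: rest)).2.length ≤ n :=
          le_trans (by simpa [scanUp, hgt] using scanUp_len x rest) hlenr
        have hmax := scanUp_maximal prev (x :: rest)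
        by_cases ht : total = 0
        · subst ht
          rw [upA_zero (x :: rest) prev 0 m]
          rw [ih _ hremlen _ 0 _ 0 _ (by positivity) le_rfl
            (fun y hy hlt => absurd hlt (hmax y hy)) (fun _ _ _ => rfl)]
          simp only [eventsB, if_pos hgt]
          rw [show scanUp prev (x :: rest) = (x :: (scanUp x rest).1, (scanUp x rest).2) from
            by simp [scanUp, hgt]]
          by_cases h3 : 3 ≤ (x :: (scanUp x rest).1).length
          · simp only [if_pos h3, List.cons_append, List.nil_append, tradeEvents]
            simp
          · rw [if_neg h3]
            simp
        · rw [upA_pos (x :: rest) prev total 0 m ht le_rfl (by omega)]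
          have hsc : scanUp prev (x :: rest) = (x :: (scanUp x rest).1, (scanUp x rest).2) := by
            simp [scanUp, hgt]
          by_cases h3 : 3 ≤ (0 : Int) + ((scanUp prev (x :: rest)).1.length : Int)
          · rw [if_pos h3]
            rw [ih _ hremlen _ 0 _ 0 _ (by positivity) le_rfl
              (fun y hy hlt => absurd hlt (hmax y hy)) (fun _ _ _ => rfl)]
            simp only [eventsB, if_pos hgt]
            rw [hsc] at h3 ⊢
            rw [if_pos (show 3 ≤ (x :: (scanUp x rest).1).length by
              simp only [List.length_cons]; simp [List.length_cons] at h3; omega)]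
            simp only [List.cons_append, List.nil_append, tradeEvents]
            simp [ht]
          · rw [if_neg h3]
            rw [ih _ hremlen _ total _ 0 _ (by positivity) le_rfl
              (fun y hy hlt => absurd hlt (hmax y hy)) (fun _ _ _ => rfl)]
            simp only [eventsB, if_pos hgt]
            rw [hsc] at h3 ⊢
            rw [if_neg (show ¬ 3 ≤ (x :: (scanUp x rest).1).length by
              simp only [List.length_cons]; simp [List.length_cons] at h3; omega)]
            simp
      · by_cases hlt : x < prev
        · -- down-run
          have hdn0 : down = 0 := hd x rfl hlt
          subst hdn0
          -- up' = 0 on this step, so the incoming up value is irrelevant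
          have reset : sungLoopA prev (x :: rest) total up 0 m =
              sungLoopA prev (x :: rest) total 0 0 m := by
            simp only [sungLoopA, if_neg hgt]
          rw [reset]
          have hsc : scanDown prev (x :: rest) = (x :: (scanDown x rest).1, (scanDown x rest).2) := by
            simp [scanDown, hlt]
          have hremlen : (scanDown prev (x :: rest)).2.length ≤ n :=
            le_trans (by simpa [scanDown, hlt] using scanDown_len x rest) hlenr
          have hmax := scanDown_maximal prev (x :: rest)
          rw [downA (x :: rest) prev total 0 m le_rfl]
          rw [ih _ hremlen _ _ 0 _ _ le_rfl (by positivity)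
            (fun _ _ _ => rfl) (fun y hy hlt' => absurd hlt' (hmax y hy))]
          simp only [eventsB, if_neg hgt, if_pos hlt]
          rw [trade_buys]
          rw [hsc]
          have e2 : ((2:Int) - 0).toNat = 2 := by omega
          simp
        · -- equal prices: both counters reset, no trade
          have step : sungLoopA prev (x :: rest) total up down m =
              sungLoopA x rest total 0 0 m := by
            have hngt2 : ¬ (prev > x) := by omega
            simp only [sungLoopA, if_neg hgt, if_neg hngt2]
            have h3 : ¬ ((0:Int) ≥ 3) := by omega
            have hns : ¬ (total ≠ 0 ∧ (0:Int) ≥ 3) := by rintro ⟨-, hh⟩; omega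
            simp only [if_neg h3, if_neg hns]
          rw [step, ih _ hlenr _ total 0 0 _ le_rfl le_rfl
            (fun _ _ _ => rfl) (fun _ _ _ => rfl)]
          have : x = prev := by omega
          simp [eventsB, hgt, hlt]

-- ===== VERDICT (by name: the statement is the Claim_ definition above) =====
theorem sung_spec : Claim_equal_sung := by
  intro m r _ _
  unfold Spec_sung sung sung_alt
  cases r with
  | nil => rfl
  | cons p rest =>
    simp only []
    rw [mainLoop rest.length rest le_rfl p 0 0 0 m le_rfl le_rfl
      (fun _ _ _ => rfl) (fun _ _ _ => rfl)]
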